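-- pv_equiv track=rewrite | github.com/IchBinJade/advent-of-code-python | 2025/day06.py | separate_math_problems
-- ===== SOURCE A (Python) =====
-- def separate_math_problems(cols):
--     groups = []
--     curr_group = []
--
--     for col in cols:
--         if set(col) == {" "}:
--             if curr_group:
--                 groups.append(curr_group)
--             curr_group = []
--         else:
--             curr_group.append(col)
--
--     if curr_group:
--         groups.append(curr_group)
--
--     return groups
-- ===== SOURCE B (Python) =====
-- def separate_math_problems(cols):
--     out = []
--     i, n = 0, len(cols)
--     while i < n:
--         if set(cols[i]) == {" "}:
--             i += 1
--         else:
--             j = i + 1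
--             while j < n and set(cols[j]) != {" "}:
--                 j += 1
--             out.append(cols[i:j])
--             i = j
--     return out
-- ===== Notes on version B (the rewrite author's own statement) =====
-- stated objective: alternative
-- what changed: Replaces the accumulator-and-flush loop (curr_group built column by column, appended on each blank separator and once more after the loop) by an index scan that skips blank columns and slices out each maximal non-blank span directly, with no pending-group state and no post-loop flush.
import Mathlib
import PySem

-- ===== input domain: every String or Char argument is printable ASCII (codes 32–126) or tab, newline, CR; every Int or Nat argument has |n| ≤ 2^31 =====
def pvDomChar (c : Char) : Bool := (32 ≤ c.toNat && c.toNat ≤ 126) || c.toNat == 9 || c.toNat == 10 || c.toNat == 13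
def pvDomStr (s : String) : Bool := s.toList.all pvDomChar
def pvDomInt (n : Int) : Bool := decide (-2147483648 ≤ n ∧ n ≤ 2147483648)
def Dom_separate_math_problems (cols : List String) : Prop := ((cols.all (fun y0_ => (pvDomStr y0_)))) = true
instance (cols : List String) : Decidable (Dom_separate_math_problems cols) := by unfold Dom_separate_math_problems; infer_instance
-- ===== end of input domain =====

-- B is an alternative decomposition of the same O(n) task: an index scan that skips
-- blank columns and slices out each maximal non-blank span, instead of A's
-- accumulator-and-flush loop.

-- shared in both Python sources: the blank-column test `set(col) == {" "}`
def pvBlank (col : String) : Bool :=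
  PySem.Set.equal (PySem.Set.ofList col.toList) (PySem.Set.ofList [' '])

-- ===== PORT A =====
-- one iteration of A's for-loop over state (groups, curr_group)
def sepStep (st : List (List String) × List String) (col : String) :
    List (List String) × List String :=
  if pvBlank col then
    (if st.2 = [] then st.1 else st.1 ++ [st.2], [])
  else
    (st.1, st.2 ++ [col])

-- the post-loop `if curr_group: groups.append(curr_group)`
def sepFinish (st : List (List String) × List String) : List (List String) :=
  if st.2 = [] then st.1 else st.1 ++ [st.2]

def separate_math_problems (cols : List String) : List (List String) :=
  sepFinish (cols.foldl sepStep ([], []))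

-- ===== PORT B =====
-- termination helper for the outer scan (the inner while-loop advances j past rest's non-blank prefix)
theorem pvDropWhile_len_le (p : String → Bool) (l : List String) :
    (l.dropWhile p).length ≤ l.length := by
  induction l with
  | nil => simp [List.dropWhile]
  | cons a t ih =>
    by_cases h : p a = true <;> simp [List.dropWhile, h] <;> omega

-- outer while-loop: skip a blank column, or emit cols[i:j] (the maximal non-blank span) and resume at j
def sepScan : List String → List (List String)
  | [] => []
  | c :: rest =>
    if pvBlank c then sepScan rest
    else (c :: rest.takeWhile (fun x => !pvBlank x)) ::
         sepScan (rest.dropWhile (fun x => !pvBlank x))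
termination_by l => l.length
decreasing_by
  · simp
  · have := pvDropWhile_len_le (fun x => !pvBlank x) rest
    simp only [List.length_cons]
    omega

def separate_math_problems_alt (cols : List String) : List (List String) :=
  sepScan cols

-- ===== PRECONDITION & SPEC =====
def Spec_separate_math_problems (cols : List String) (out : List (List String)) : Prop := out = separate_math_problems_alt cols
instance (cols : List String) (out : List (List String)) : Decidable (Spec_separate_math_problems cols out) := by unfold Spec_separate_math_problems; infer_instance

-- ===== CLAIM (what is proved, stated in full; the proofs are below) =====
def Claim_equal_separate_math_problems : Prop := ∀ (cols : List String), Dom_separate_math_problems cols → Spec_separate_math_problems cols (separate_math_problems cols)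

-- ===== LEMMAS AND PROOFS =====

-- already-flushed groups are a passive prefix of A's final result
theorem sepFinish_foldl_prefix (cols : List String) :
    ∀ (groups : List (List String)) (curr : List String),
      sepFinish (cols.foldl sepStep (groups, curr))
        = groups ++ sepFinish (cols.foldl sepStep ([], curr)) := by
  induction cols with
  | nil =>
    intro groups curr
    by_cases h : curr = [] <;> simp [sepFinish, h]
  | cons c rest ih =>
    intro groups curr
    by_cases hb : pvBlank c = true
    · by_cases hc : curr = []
      · simp only [List.foldl_cons, sepStep, hb, if_true, hc, ite_true]
        exact ih groups []
      · simp only [List.foldl_cons, sepStep, hb, if_true, hc, ite_false,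
          List.nil_append]
        rw [ih (groups ++ [curr]) [], ih [curr] []]
        simp
    · simp only [List.foldl_cons, sepStep, hb, if_false]
      exact ih groups (curr ++ [c])

-- a non-blank span is absorbed into A's pending group
theorem sepFoldl_nonblank (g : List String) (hg : ∀ x ∈ g, pvBlank x = false) :
    ∀ (rest curr : List String),
      (g ++ rest).foldl sepStep ([], curr) = rest.foldl sepStep ([], curr ++ g) := by
  induction g with
  | nil => intro rest curr; simp
  | cons a t ih =>
    intro rest curr
    have ha : pvBlank a = false := hg a (by simp)
    have ht : ∀ x ∈ t, pvBlank x = false := fun x hx => hg x (by simp [hx])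
    simp only [List.cons_append, List.foldl_cons, sepStep, ha, Bool.false_eq_true,
      if_false]
    rw [ih ht rest (curr ++ [a])]
    simp

-- main invariant: A's loop from the empty state computes B's scan
theorem sepLoop_eq_scan : ∀ (n : ℕ) (cols : List String), cols.length ≤ n →
    sepFinish (cols.foldl sepStep ([], [])) = sepScan cols := by
  intro n
  induction n with
  | zero =>
    intro cols h
    have : cols = [] := List.eq_nil_of_length_eq_zero (Nat.le_zero.mp h)
    subst this; simp [sepFinish, sepScan]
  | succ n ih =>
    intro cols h
    match cols with
    | [] => simp [sepFinish, sepScan]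
    | c :: rest =>
      simp only [List.length_cons, Nat.add_le_add_iff_right] at h
      by_cases hb : pvBlank c = true
      · simp only [List.foldl_cons, sepStep, hb, if_true, sepScan, ite_true]
        exact ih rest h
      · have hb' : pvBlank c = false := by simpa using hb
        have htall : ∀ x ∈ rest.takeWhile (fun x => !pvBlank x), pvBlank x = false := by
          intro x hx
          simpa using List.mem_takeWhile_imp hx
        have key : rest.foldl sepStep ([], [c])
            = (rest.dropWhile (fun x => !pvBlank x)).foldl sepStep
                ([], c :: rest.takeWhile (fun x => !pvBlank x)) := by
          conv_lhs => rw [← List.takeWhile_append_dropWhile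
            (p := fun x => !pvBlank x) (l := rest)]
          rw [sepFoldl_nonblank _ htall _ _]
          simp
        simp only [List.foldl_cons, sepStep, hb', Bool.false_eq_true, if_false,
          List.nil_append]
        rw [key]
        rw [show sepScan (c :: rest)
              = (c :: rest.takeWhile (fun x => !pvBlank x)) ::
                sepScan (rest.dropWhile (fun x => !pvBlank x)) from by
            rw [sepScan]; simp [hb']]
        rcases hdrop : rest.dropWhile (fun x => !pvBlank x) with _ | ⟨b, d'⟩
        · simp [sepFinish, sepScan]
        · have hbb : pvBlank b = true := by
            have hh := List.head?_dropWhile_not (fun x => !pvBlank x) rest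
            rw [hdrop] at hh
            simp at hh
            simpa using hh
          have hlen' : d'.length ≤ n := by
            have hle := pvDropWhile_len_le (fun x => !pvBlank x) rest
            rw [hdrop] at hle
            simp at hle
            omega
          simp only [List.foldl_cons, sepStep, hbb, if_true]
          have hne : (c :: rest.takeWhile (fun x => !pvBlank x) : List String) ≠ [] := by
            simp
          rw [if_neg hne]
          rw [sepFinish_foldl_prefix d'
            ([] ++ [c :: rest.takeWhile (fun x => !pvBlank x)]) []]
          rw [ih d' hlen']
          rw [show sepScan (b :: d') = sepScan d' from by rw [sepScan]; simp [hbb]]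
          simp

-- ===== VERDICT (by name: the statement is the Claim_ definition above) =====
theorem separate_math_problems_spec : Claim_equal_separate_math_problems := by
  intro cols _
  unfold Spec_separate_math_problems separate_math_problems separate_math_problems_alt
  exact sepLoop_eq_scan cols.length cols le_rfl
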